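-- pv_equiv track=rewrite | github.com/haydenzyu/EECS118 | GeometryProblemSolver/M161.py | is_same_edge
-- ===== SOURCE A (Python) =====
-- def is_same_edge(n1, n2):
--     edges = [['sb3', 'sa5', 'sb1'],
--         ['sc3', 'sb5', 'sa2'],
--         ['sa4', 'sa6', 'sc1'],
--         ['sb4', 'sb6', 'sc2'],
--         ['sc4', 'sa1', 'sb2']]
--     for e in edges:
--         if n1 in e and n2 in e:
--             return True
--     return False
-- ===== SOURCE B (Python) =====
-- def is_same_edge(n1, n2):
--     edge_of = {'sb3': 0, 'sa5': 0, 'sb1': 0,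
--                'sc3': 1, 'sb5': 1, 'sa2': 1,
--                'sa4': 2, 'sa6': 2, 'sc1': 2,
--                'sb4': 3, 'sb6': 3, 'sc2': 3,
--                'sc4': 4, 'sa1': 4, 'sb2': 4}
--     return n1 in edge_of and edge_of[n1] == edge_of.get(n2)
-- ===== Notes on version B (the rewrite author's own statement) =====
-- stated objective: idiomatic
-- what changed: Replaced the edge-by-edge membership scan with a node->edge-id dict built once and a single index comparison (with a presence guard on n1).
import Mathlib
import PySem

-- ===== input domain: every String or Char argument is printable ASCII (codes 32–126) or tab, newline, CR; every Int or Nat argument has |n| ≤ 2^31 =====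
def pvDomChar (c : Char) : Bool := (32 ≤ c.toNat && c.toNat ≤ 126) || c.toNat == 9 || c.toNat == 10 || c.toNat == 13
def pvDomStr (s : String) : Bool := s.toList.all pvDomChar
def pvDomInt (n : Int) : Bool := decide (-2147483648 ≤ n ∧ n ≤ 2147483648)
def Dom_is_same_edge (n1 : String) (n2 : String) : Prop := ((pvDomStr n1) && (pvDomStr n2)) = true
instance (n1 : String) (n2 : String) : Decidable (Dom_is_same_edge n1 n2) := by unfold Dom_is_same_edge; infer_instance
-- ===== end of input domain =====

-- B replaces A's edge-by-edge membership scan with a node→edge-id dictionary built once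
-- and a single index comparison (idiomatic; return value only, no side effects involved).

-- ===== PORT A =====
def iseEdges : List (List String) :=
  [["sb3", "sa5", "sb1"],
   ["sc3", "sb5", "sa2"],
   ["sa4", "sa6", "sc1"],
   ["sb4", "sb6", "sc2"],
   ["sc4", "sa1", "sb2"]]

-- 'for e in edges: if n1 in e and n2 in e: return True / return False'
def iseLoop (n1 : String) (n2 : String) : List (List String) → Bool
  | [] => false
  | e :: rest => if e.contains n1 && e.contains n2 then true else iseLoop n1 n2 rest

def is_same_edge (n1 : String) (n2 : String) : Bool :=
  iseLoop n1 n2 iseEdges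

-- ===== PORT B =====
def iseEdgeOf : PySem.Dict String Int :=
  PySem.Dict.ofList
    [("sb3", 0), ("sa5", 0), ("sb1", 0),
     ("sc3", 1), ("sb5", 1), ("sa2", 1),
     ("sa4", 2), ("sa6", 2), ("sc1", 2),
     ("sb4", 3), ("sb6", 3), ("sc2", 3),
     ("sc4", 4), ("sa1", 4), ("sb2", 4)]

-- 'n1 in edge_of and edge_of[n1] == edge_of.get(n2)'  (int == None is False in Python)
def is_same_edge_alt (n1 : String) (n2 : String) : Bool :=
  match iseEdgeOf.get? n1 with
  | some i => iseEdgeOf.get? n2 == some i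
  | none => false

-- ===== PRECONDITION & SPEC =====
def Spec_is_same_edge (n1 : String) (n2 : String) (out : Bool) : Prop := out = is_same_edge_alt n1 n2
instance (n1 : String) (n2 : String) (out : Bool) : Decidable (Spec_is_same_edge n1 n2 out) := by unfold Spec_is_same_edge; infer_instance

-- ===== CLAIM (what is proved, stated in full; the proofs are below) =====
def Claim_equal_is_same_edge : Prop := ∀ (n1 : String) (n2 : String), Dom_is_same_edge n1 n2 → Spec_is_same_edge n1 n2 (is_same_edge n1 n2)

-- ===== LEMMAS AND PROOFS =====
-- All keys are distinct, so the built dict's item list is the literal pair list.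
theorem iseEdgeOf_items : iseEdgeOf = PySem.Dict.mk
    [("sb3", 0), ("sa5", 0), ("sb1", 0),
     ("sc3", 1), ("sb5", 1), ("sa2", 1),
     ("sa4", 2), ("sa6", 2), ("sc1", 2),
     ("sb4", 3), ("sb6", 3), ("sc2", 3),
     ("sc4", 4), ("sa1", 4), ("sb2", 4)] := by decide

-- ===== VERDICT (by name: the statement is the Claim_ definition above) =====
set_option maxHeartbeats 1000000 in
theorem is_same_edge_spec : Claim_equal_is_same_edge := by
  intro n1 n2 _
  unfold Spec_is_same_edge is_same_edge is_same_edge_alt iseEdges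
  simp only [iseLoop, List.contains_cons, List.contains_nil]
  split_ifs with h1 h2 h3 h4 h5
  · simp only [Bool.and_eq_true, Bool.or_eq_true, beq_iff_eq, Bool.or_false] at h1
    obtain ⟨ha, hb⟩ := h1
    rcases ha with rfl | rfl | rfl <;> rcases hb with rfl | rfl | rfl <;> decide
  · simp only [Bool.and_eq_true, Bool.or_eq_true, beq_iff_eq, Bool.or_false] at h2
    obtain ⟨ha, hb⟩ := h2
    rcases ha with rfl | rfl | rfl <;> rcases hb with rfl | rfl | rfl <;> decide
  · simp only [Bool.and_eq_true, Bool.or_eq_true, beq_iff_eq, Bool.or_false] at h3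
    obtain ⟨ha, hb⟩ := h3
    rcases ha with rfl | rfl | rfl <;> rcases hb with rfl | rfl | rfl <;> decide
  · simp only [Bool.and_eq_true, Bool.or_eq_true, beq_iff_eq, Bool.or_false] at h4
    obtain ⟨ha, hb⟩ := h4
    rcases ha with rfl | rfl | rfl <;> rcases hb with rfl | rfl | rfl <;> decide
  · simp only [Bool.and_eq_true, Bool.or_eq_true, beq_iff_eq, Bool.or_false] at h5
    obtain ⟨ha, hb⟩ := h5
    rcases ha with rfl | rfl | rfl <;> rcases hb with rfl | rfl | rfl <;> decide
  · rcases hg1 : iseEdgeOf.get? n1 with _ | i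
    · rfl
    · have hm1 := PySem.Dict.mem_items_of_get?_eq_some _ hg1
      rcases hg2 : iseEdgeOf.get? n2 with _ | j
      · rfl
      · have hm2 := PySem.Dict.mem_items_of_get?_eq_some _ hg2
        rw [iseEdgeOf_items] at hm1 hm2
        simp only [List.mem_cons, List.not_mem_nil, or_false,
          Prod.mk.injEq] at hm1 hm2
        rcases hm1 with ⟨rfl, rfl⟩ | ⟨rfl, rfl⟩ | ⟨rfl, rfl⟩ | ⟨rfl, rfl⟩ | ⟨rfl, rfl⟩ | ⟨rfl, rfl⟩ | ⟨rfl, rfl⟩ | ⟨rfl, rfl⟩ | ⟨rfl, rfl⟩ | ⟨rfl, rfl⟩ | ⟨rfl, rfl⟩ | ⟨rfl, rfl⟩ | ⟨rfl, rfl⟩ | ⟨rfl, rfl⟩ | ⟨rfl, rfl⟩ <;>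
          rcases hm2 with ⟨rfl, rfl⟩ | ⟨rfl, rfl⟩ | ⟨rfl, rfl⟩ | ⟨rfl, rfl⟩ | ⟨rfl, rfl⟩ | ⟨rfl, rfl⟩ | ⟨rfl, rfl⟩ | ⟨rfl, rfl⟩ | ⟨rfl, rfl⟩ | ⟨rfl, rfl⟩ | ⟨rfl, rfl⟩ | ⟨rfl, rfl⟩ | ⟨rfl, rfl⟩ | ⟨rfl, rfl⟩ | ⟨rfl, rfl⟩ <;>
          simp_all
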